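-- pv_equiv track=rewrite | github.com/aLoneThirts/SiemensOtomasyon | backend-python/urun_matcher.py | toplu_esleme
-- ===== SOURCE A (Python) =====
-- from typing import List, Dict, Any
--
-- def toplu_esleme(urun_kodlari: List[str]) -> Dict[str, List[str]]:
--     """Tüm ürün kodlarını başlangıçlarına göre gruplar"""
--     gruplar = {}
--
--     for kod in urun_kodlari:
--         if len(kod) >= 3:
--             baslangic = kod[:3].upper()
--             if baslangic not in gruplar:
--                 gruplar[baslangic] = []
--             gruplar[baslangic].append(kod)
--
--     # Her grubu sırala
--     for baslangic in gruplar: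
--         gruplar[baslangic] = sorted(gruplar[baslangic])
--
--     return gruplar
-- ===== SOURCE B (Python) =====
-- from typing import List, Dict
--
-- def toplu_esleme(urun_kodlari: List[str]) -> Dict[str, List[str]]:
--     """Tüm ürün kodlarını başlangıçlarına göre gruplar"""
--     valid = [kod for kod in urun_kodlari if len(kod) >= 3]
--     buckets = {}
--     for kod in sorted(valid):
--         buckets.setdefault(kod[:3].upper(), []).append(kod)
--     # keys re-listed in first-occurrence order; each bucket is already sorted
--     return {kod[:3].upper(): buckets[kod[:3].upper()] for kod in valid}
-- ===== Notes on version B (the rewrite author's own statement) =====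
-- stated objective: alternative
-- what changed: Instead of bucketing codes in input order and then sorting every bucket separately, B filters, sorts the whole list once, fills buckets in globally sorted order (so each bucket is born sorted), and re-lists the keys in first-occurrence order with a dict comprehension.
import Mathlib
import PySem

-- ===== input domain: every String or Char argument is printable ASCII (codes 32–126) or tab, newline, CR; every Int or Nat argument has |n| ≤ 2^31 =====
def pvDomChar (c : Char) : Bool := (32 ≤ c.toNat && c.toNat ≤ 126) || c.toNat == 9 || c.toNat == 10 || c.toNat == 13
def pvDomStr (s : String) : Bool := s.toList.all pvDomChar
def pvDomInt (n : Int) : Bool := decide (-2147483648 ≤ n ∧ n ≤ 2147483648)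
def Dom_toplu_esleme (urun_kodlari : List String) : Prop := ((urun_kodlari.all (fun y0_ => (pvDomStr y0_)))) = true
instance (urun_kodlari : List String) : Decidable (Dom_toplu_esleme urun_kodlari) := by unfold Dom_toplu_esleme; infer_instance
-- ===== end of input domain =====

-- B replaces A's per-group sorting by one global sort of the filtered codes, bucketing in
-- sorted order so every bucket comes out sorted (alternative decomposition, same behaviour).


-- ===== PORT A =====
def toplu_esleme (urun_kodlari : List String) : List (String × List String) :=
  let gruplar : PySem.Dict String (List String) :=
    urun_kodlari.foldl (fun g kod =>
      if 3 ≤ PySem.Str.len kod then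
        let baslangic := PySem.Str.upper (PySem.Str.slice kod none (some 3))
        let g1 := if g.contains baslangic then g else g.insert baslangic []
        g1.modify baslangic [] (fun l => l ++ [kod])
      else g) PySem.Dict.empty
  let gruplar2 :=
    gruplar.keys.foldl (fun g baslangic =>
      g.insert baslangic (PySem.List.sorted (g.getD baslangic []) (fun x => x))) gruplar
  gruplar2.items

-- ===== PORT B =====
def toplu_esleme_alt (urun_kodlari : List String) : List (String × List String) :=
  let valid := urun_kodlari.filter (fun kod => decide (3 ≤ PySem.Str.len kod))
  let buckets : PySem.Dict String (List String) :=
    (PySem.List.sorted valid (fun x => x)).foldl (fun d kod =>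
      (d.setdefault (PySem.Str.upper (PySem.Str.slice kod none (some 3))) []).modify
        (PySem.Str.upper (PySem.Str.slice kod none (some 3))) [] (fun l => l ++ [kod]))
      PySem.Dict.empty
  (valid.foldl (fun d kod =>
      d.insert (PySem.Str.upper (PySem.Str.slice kod none (some 3)))
        (buckets.getD (PySem.Str.upper (PySem.Str.slice kod none (some 3))) []))
    PySem.Dict.empty).items

-- ===== PRECONDITION & SPEC =====
def Spec_toplu_esleme (urun_kodlari : List String) (out : List (String × List String)) : Prop := out = toplu_esleme_alt urun_kodlari
instance (urun_kodlari : List String) (out : List (String × List String)) : Decidable (Spec_toplu_esleme urun_kodlari out) := by unfold Spec_toplu_esleme; infer_instance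

-- ===== CLAIM (what is proved, stated in full; the proofs are below) =====
def Claim_equal_toplu_esleme : Prop := ∀ (urun_kodlari : List String), Dom_toplu_esleme urun_kodlari → Spec_toplu_esleme urun_kodlari (toplu_esleme urun_kodlari)

-- ===== LEMMAS AND PROOFS =====

/-- The 3-char uppercase prefix both programs group by. -/
def pvPref (kod : String) : String := PySem.Str.upper (PySem.Str.slice kod none (some 3))

/-- A's "if absent insert []; then append" step is one modify-append. -/
theorem pv_stepA_eq_modify (g : PySem.Dict String (List String)) (kod : String) :
    ((if g.contains (pvPref kod) then g else g.insert (pvPref kod) []).modify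
      (pvPref kod) [] (fun l => l ++ [kod]))
    = g.modify (pvPref kod) [] (fun l => l ++ [kod]) := by
  by_cases h : g.contains (pvPref kod)
  · simp [h]
  · simp only [Bool.not_eq_true] at h
    simp only [h, Bool.false_eq_true, if_false, PySem.Dict.modify,
      PySem.Dict.getD_insert_self, PySem.Dict.insert_insert_self,
      PySem.Dict.getD_of_not_contains g [] h]

/-- B's "setdefault then append" step is the same modify-append. -/
theorem pv_stepB_eq_modify (g : PySem.Dict String (List String)) (kod : String) :
    ((g.setdefault (pvPref kod) []).modify (pvPref kod) [] (fun l => l ++ [kod]))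
    = g.modify (pvPref kod) [] (fun l => l ++ [kod]) := by
  by_cases h : g.contains (pvPref kod)
  · rw [PySem.Dict.setdefault_of_contains _ _ h]
  · simp only [Bool.not_eq_true] at h
    rw [PySem.Dict.setdefault_of_not_contains _ _ h]
    simp only [PySem.Dict.modify, PySem.Dict.getD_insert_self,
      PySem.Dict.insert_insert_self, PySem.Dict.getD_of_not_contains g [] h]

/-- getD after the modify-append grouping fold keyed by pvPref. -/
theorem pv_getD_groupFold (l : List String) (c : String) :
    ((l.foldl (fun d kod => d.modify (pvPref kod) [] (fun v => v ++ [kod]))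
        (PySem.Dict.empty : PySem.Dict String (List String))).getD c [])
    = l.filter (fun kod => pvPref kod == c) := by
  have h := PySem.Dict.getD_foldl_modify_append
      (l.map (fun kod => (pvPref kod, kod))) (PySem.Dict.empty : PySem.Dict String (List String)) c
  rw [List.foldl_map] at h
  rw [h, List.filter_map]
  simp [Function.comp_def]

/-- a PySem.Set.update by elements already present is the identity. -/
theorem pv_set_update_self {α : Type} [BEq α] [LawfulBEq α] (l : List α) (s : PySem.Set α)
    (h : ∀ x ∈ l, x ∈ s) : PySem.Set.update s l = s := by
  induction l generalizing s with
  | nil => rfl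
  | cons a t ih =>
      have ha : PySem.Set.add s a = s := by
        have : a ∈ s := h a (by simp)
        simp [PySem.Set.add, this]
      show PySem.Set.update (PySem.Set.add s a) t = s
      rw [ha]
      exact ih s (fun x hx => h x (by simp [hx]))

/-- A's second loop: re-assign each (distinct) key to f of its old value. -/
theorem pv_getD_resortFold (ks : List String) (g : PySem.Dict String (List String))
    (f : List String → List String) (hnd : ks.Nodup) (p : String) :
    ((ks.foldl (fun g b => g.insert b (f (g.getD b []))) g).getD p [])
    = if p ∈ ks then f (g.getD p []) else g.getD p [] := by
  induction ks generalizing g with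
  | nil => simp
  | cons b t ih =>
      simp only [List.nodup_cons] at hnd
      simp only [List.foldl_cons]
      rw [ih _ hnd.2]
      by_cases hpt : p ∈ t
      · have hpb : p ≠ b := fun e => hnd.1 (e ▸ hpt)
        simp [hpt, hpb, PySem.Dict.getD_insert]
      · by_cases hpb : p = b
        · subst hpb
          simp [hpt, PySem.Dict.getD_insert_self]
        · simp [hpt, hpb, PySem.Dict.getD_insert]

/-- B's rebuild loop: insert key-determined values; getD afterwards. -/
theorem pv_getD_rebuildFold (l : List String) (v : String → List String)
    (d : PySem.Dict String (List String)) (p : String) :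
    ((l.foldl (fun d kod => d.insert (pvPref kod) (v (pvPref kod))) d).getD p [])
    = if p ∈ l.map pvPref then v p else d.getD p [] := by
  induction l generalizing d with
  | nil => simp
  | cons a t ih =>
      simp only [List.foldl_cons, List.map_cons, List.mem_cons]
      rw [ih]
      by_cases hpt : p ∈ t.map pvPref
      · simp [hpt]
      · by_cases hpa : p = pvPref a
        · simp [hpa, PySem.Dict.getD_insert_self]
        · simp [hpt, hpa, PySem.Dict.getD_insert]

/-- sorting commutes with filtering (strings, identity key). -/
theorem pv_sorted_filter (l : List String) (q : String → Bool) :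
    PySem.List.sorted (l.filter q) (fun x => x)
    = (PySem.List.sorted l (fun x => x)).filter q := by
  refine PySem.List.sorted_id_eq_of_perm_of_pairwise _ _ ?_ ?_
  · exact (PySem.List.sorted_perm l (fun x => x) false).filter q
  · exact (PySem.List.sorted_pairwise l (fun x => x)).filter q

-- ===== VERDICT (by name: the statement is the Claim_ definition above) =====
theorem toplu_esleme_spec : Claim_equal_toplu_esleme := by
  intro urun_kodlari _
  unfold Spec_toplu_esleme toplu_esleme toplu_esleme_alt
  simp only []
  set valid := urun_kodlari.filter (fun kod => decide (3 ≤ PySem.Str.len kod)) with hvalid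
  -- A's first loop is the grouping fold over `valid`
  have hfoldA :
      (urun_kodlari.foldl (fun g kod =>
        if 3 ≤ PySem.Str.len kod then
          let baslangic := PySem.Str.upper (PySem.Str.slice kod none (some 3))
          let g1 := if g.contains baslangic then g else g.insert baslangic []
          g1.modify baslangic [] (fun l => l ++ [kod])
        else g) (PySem.Dict.empty : PySem.Dict String (List String)))
      = valid.foldl (fun d kod => d.modify (pvPref kod) [] (fun v => v ++ [kod]))
          PySem.Dict.empty := by
    rw [hvalid, List.foldl_filter]
    refine PySem.List.foldl_congr_mem _ _ _ _ ?_
    intro g kod _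
    by_cases h : 3 ≤ PySem.Str.len kod
    · rw [if_pos h, if_pos (decide_eq_true h)]
      exact pv_stepA_eq_modify g kod
    · rw [if_neg h, if_neg (fun hc => h (of_decide_eq_true hc))]
  rw [hfoldA]
  set gA := valid.foldl (fun d kod => d.modify (pvPref kod) [] (fun v => v ++ [kod]))
      (PySem.Dict.empty : PySem.Dict String (List String)) with hgA
  -- B's bucket loop is the grouping fold over `sorted valid`
  have hfoldB :
      ((PySem.List.sorted valid (fun x => x)).foldl (fun d kod =>
        (d.setdefault (PySem.Str.upper (PySem.Str.slice kod none (some 3))) []).modify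
          (PySem.Str.upper (PySem.Str.slice kod none (some 3))) [] (fun l => l ++ [kod]))
        (PySem.Dict.empty : PySem.Dict String (List String)))
      = (PySem.List.sorted valid (fun x => x)).foldl
          (fun d kod => d.modify (pvPref kod) [] (fun v => v ++ [kod])) PySem.Dict.empty := by
    refine PySem.List.foldl_congr_mem _ _ _ _ ?_
    intro g kod _
    exact pv_stepB_eq_modify g kod
  rw [hfoldB]
  set buckets := (PySem.List.sorted valid (fun x => x)).foldl
      (fun d kod => d.modify (pvPref kod) [] (fun v => v ++ [kod]))
      (PySem.Dict.empty : PySem.Dict String (List String)) with hbuckets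
  set A2 := gA.keys.foldl (fun g baslangic =>
      g.insert baslangic (PySem.List.sorted (g.getD baslangic []) (fun x => x))) gA with hA2
  set B2 := valid.foldl (fun d kod =>
      d.insert (PySem.Str.upper (PySem.Str.slice kod none (some 3)))
        (buckets.getD (PySem.Str.upper (PySem.Str.slice kod none (some 3))) []))
      (PySem.Dict.empty : PySem.Dict String (List String)) with hB2
  -- keys
  have hkeysA : gA.keys = PySem.Set.update ([] : PySem.Set String) (valid.map pvPref) := by
    rw [hgA]
    exact (PySem.Dict.keys_foldl_modify_key valid pvPref []
      (fun _ kod => fun v => v ++ [kod]) PySem.Dict.empty).trans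
      (by rw [PySem.Dict.keys_empty])
  have hndA : gA.keys.Nodup := by
    rw [hgA]
    exact PySem.Dict.nodup_keys_foldl_modify_key valid pvPref [] _ _ PySem.Dict.nodup_keys_empty
  have hkeysA2 : A2.keys = gA.keys := by
    rw [hA2]
    exact (PySem.Dict.keys_foldl_insert gA.keys
      (fun g b => PySem.List.sorted (g.getD b []) (fun x => x)) gA).trans
      (pv_set_update_self gA.keys gA.keys (fun x hx => hx))
  have hndA2 : A2.keys.Nodup := by
    rw [hA2]
    exact PySem.Dict.nodup_keys_foldl_insert _ _ _ hndA
  have hkeysB2 : B2.keys = PySem.Set.update ([] : PySem.Set String) (valid.map pvPref) := by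
    rw [hB2]
    exact (PySem.Dict.keys_foldl_insert_key valid pvPref
      (fun _ kod => buckets.getD (pvPref kod) []) PySem.Dict.empty).trans
      (by rw [PySem.Dict.keys_empty])
  have hndB2 : B2.keys.Nodup := by
    rw [hB2]
    exact PySem.Dict.nodup_keys_foldl_insert_key valid pvPref
      (fun _ kod => buckets.getD (pvPref kod) []) _ PySem.Dict.nodup_keys_empty
  -- items
  rw [PySem.Dict.items_eq_map_keys A2 hndA2 [], PySem.Dict.items_eq_map_keys B2 hndB2 [],
    hkeysA2, hkeysB2, hkeysA]
  refine List.map_congr_left ?_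
  intro p hp
  have hpmem : p ∈ valid.map pvPref := by
    rcases (PySem.Set.mem_update ([] : PySem.Set String) (valid.map pvPref) p).1 hp with h | h
    · simp at h
    · exact h
  have hpgA : p ∈ gA.keys := by rw [hkeysA]; exact hp
  have hgAp : gA.getD p [] = valid.filter (fun kod => pvPref kod == p) := by
    rw [hgA]; exact pv_getD_groupFold valid p
  have hbp : buckets.getD p [] = (PySem.List.sorted valid (fun x => x)).filter
      (fun kod => pvPref kod == p) := by
    rw [hbuckets]; exact pv_getD_groupFold _ p
  have hA2p : A2.getD p [] = PySem.List.sorted (valid.filter (fun kod => pvPref kod == p))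
      (fun x => x) := by
    rw [hA2]
    exact (pv_getD_resortFold gA.keys gA (fun v => PySem.List.sorted v (fun x => x)) hndA p).trans
      (by rw [if_pos hpgA, hgAp])
  have hB2p : B2.getD p [] = buckets.getD p [] := by
    rw [hB2]
    exact (pv_getD_rebuildFold valid (fun q => buckets.getD q []) PySem.Dict.empty p).trans
      (by rw [if_pos hpmem])
  rw [hA2p, hB2p, hbp, pv_sorted_filter]
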